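-- pv_equiv track=rewrite | github.com/lunagariyabhavesh1991/ca-office-utility | core/pdf_editor_engine.py | _map_to_base14
-- ===== SOURCE A (Python) =====
-- def _map_to_base14(fontname_lower, is_bold, is_italic, flags):
--     """Maps to the closest Base14 built-in font (last resort)."""
--     serif_names = ["times", "serif", "bookman", "georgia", "palatino",
--                    "garamond", "century", "cambria", "didot"]
--     is_serif = (flags & 4) or any(x in fontname_lower for x in serif_names)
--
--     mono_names = ["courier", "mono", "consolas", "lucida", "code", "fixed"]
--     is_mono = (flags & 8) or any(x in fontname_lower for x in mono_names)
--
--     if is_serif: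
--         if is_bold and is_italic: return "biit"
--         elif is_bold: return "tibo"
--         elif is_italic: return "tiit"
--         else: return "tiro"
--     elif is_mono:
--         if is_bold and is_italic: return "boit"
--         elif is_bold: return "cobo"
--         elif is_italic: return "coit"
--         else: return "cour"
--     else:
--         if is_bold and is_italic: return "hbit"
--         elif is_bold: return "hebo"
--         elif is_italic: return "heit"
--         else: return "helv"
-- ===== SOURCE B (Python) =====
-- _SERIF_NAMES = ["times", "serif", "bookman", "georgia", "palatino",
--                 "garamond", "century", "cambria", "didot"]
-- _MONO_NAMES = ["courier", "mono", "consolas", "lucida", "code", "fixed"]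
-- # one ordered keyword list: serif keywords (category 0) before mono keywords (category 1)
-- _KEYWORDS = [(n, 0) for n in _SERIF_NAMES] + [(n, 1) for n in _MONO_NAMES]
-- # flat code string: category * 16 + bold * 8 + italic * 4 addresses a 4-char code
-- _CODES = "tirotiittibobiit" "courcoitcoboboit" "helvheithebohbit"
--
--
-- def _map_to_base14(fontname_lower, is_bold, is_italic, flags):
--     """Maps to the closest Base14 built-in font (last resort)."""
--     cat = 2  # sans unless a keyword or flag says otherwise
--     for kw, c in _KEYWORDS:
--         if kw in fontname_lower:
--             cat = c
--             break
--     if flags & 4: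
--         cat = 0  # serif flag beats everything
--     elif (flags & 8) and cat == 2:
--         cat = 1  # mono flag only upgrades sans
--     i = 16 * cat + (8 if is_bold else 0) + (4 if is_italic else 0)
--     return _CODES[i:i + 4]
-- ===== Notes on version B (the rewrite author's own statement) =====
-- stated objective: alternative
-- what changed: Replaces A's two per-category any() scans plus 12-branch nested conditional cascade by a single ordered first-match scan over one (keyword, category) list with flag overrides, and an arithmetic index (16*category + 8*bold + 4*italic) slicing the 4-char code out of one flat code string.
import Mathlib
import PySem

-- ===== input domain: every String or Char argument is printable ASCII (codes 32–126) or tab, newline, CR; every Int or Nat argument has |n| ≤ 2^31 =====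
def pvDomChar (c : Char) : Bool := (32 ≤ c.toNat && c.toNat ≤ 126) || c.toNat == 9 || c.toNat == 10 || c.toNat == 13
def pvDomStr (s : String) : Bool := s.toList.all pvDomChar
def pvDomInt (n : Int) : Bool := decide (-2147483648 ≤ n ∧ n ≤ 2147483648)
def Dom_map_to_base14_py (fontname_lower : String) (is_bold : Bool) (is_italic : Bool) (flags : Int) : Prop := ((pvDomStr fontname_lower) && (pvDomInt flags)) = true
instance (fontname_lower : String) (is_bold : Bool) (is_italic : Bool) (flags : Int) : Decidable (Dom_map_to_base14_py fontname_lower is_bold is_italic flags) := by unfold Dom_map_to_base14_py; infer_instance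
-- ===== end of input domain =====

-- B replaces A's per-category any() scans and 12-branch nested cascade by one ordered first-match
-- keyword scan plus an arithmetic index into a flat code string; objective: simpler.

-- ===== PORT A =====
def map_to_base14_py (fontname_lower : String) (is_bold : Bool) (is_italic : Bool) (flags : Int) : String :=
  let serif_names : List String := ["times", "serif", "bookman", "georgia", "palatino",
                                    "garamond", "century", "cambria", "didot"]
  let is_serif : Bool := decide (PySem.Int.band flags 4 ≠ 0) || serif_names.any (fun x => PySem.Str.isIn x fontname_lower)
  let mono_names : List String := ["courier", "mono", "consolas", "lucida", "code", "fixed"]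
  let is_mono : Bool := decide (PySem.Int.band flags 8 ≠ 0) || mono_names.any (fun x => PySem.Str.isIn x fontname_lower)
  if is_serif then
    if is_bold && is_italic then "biit"
    else if is_bold then "tibo"
    else if is_italic then "tiit"
    else "tiro"
  else if is_mono then
    if is_bold && is_italic then "boit"
    else if is_bold then "cobo"
    else if is_italic then "coit"
    else "cour"
  else
    if is_bold && is_italic then "hbit"
    else if is_bold then "hebo"
    else if is_italic then "heit"
    else "helv"

-- ===== PORT B =====
def b14SerifNames : List String := ["times", "serif", "bookman", "georgia", "palatino",
                                    "garamond", "century", "cambria", "didot"]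
def b14MonoNames : List String := ["courier", "mono", "consolas", "lucida", "code", "fixed"]
-- _KEYWORDS: serif keywords (category 0) before mono keywords (category 1)
def b14Keywords : List (String × Int) :=
  (b14SerifNames.map (fun n => (n, (0 : Int)))) ++ (b14MonoNames.map (fun n => (n, (1 : Int))))
def b14Codes : String := "tirotiittibobiitcourcoitcoboboithelvheithebohbit"

-- the for/break loop of B: first keyword contained in the font name decides the category, default 2
def b14Scan (kws : List (String × Int)) (fontname_lower : String) : Int :=
  match kws with
  | [] => 2
  | (kw, c) :: rest => if PySem.Str.isIn kw fontname_lower then c else b14Scan rest fontname_lower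

def map_to_base14_py_alt (fontname_lower : String) (is_bold : Bool) (is_italic : Bool) (flags : Int) : String :=
  let cat0 : Int := b14Scan b14Keywords fontname_lower
  let cat : Int :=
    if PySem.Int.band flags 4 ≠ 0 then 0
    else if PySem.Int.band flags 8 ≠ 0 ∧ cat0 = 2 then 1
    else cat0
  let i : Int := 16 * cat + (if is_bold then 8 else 0) + (if is_italic then 4 else 0)
  PySem.Str.slice b14Codes (some i) (some (i + 4))

-- ===== PRECONDITION & SPEC =====
def Spec_map_to_base14_py (fontname_lower : String) (is_bold : Bool) (is_italic : Bool) (flags : Int) (out : String) : Prop := out = map_to_base14_py_alt fontname_lower is_bold is_italic flags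
instance (fontname_lower : String) (is_bold : Bool) (is_italic : Bool) (flags : Int) (out : String) : Decidable (Spec_map_to_base14_py fontname_lower is_bold is_italic flags out) := by unfold Spec_map_to_base14_py; infer_instance

-- ===== CLAIM (what is proved, stated in full; the proofs are below) =====
def Claim_equal_map_to_base14_py : Prop := ∀ (fontname_lower : String) (is_bold : Bool) (is_italic : Bool) (flags : Int), Dom_map_to_base14_py fontname_lower is_bold is_italic flags → Spec_map_to_base14_py fontname_lower is_bold is_italic flags (map_to_base14_py fontname_lower is_bold is_italic flags)

-- ===== LEMMAS AND PROOFS =====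

-- a constant-category block of the keyword list scans exactly like an any() over its names
theorem b14Scan_map_append (l : List String) (c : Int) (rest : List (String × Int)) (f : String) :
    b14Scan (l.map (fun n => (n, c)) ++ rest) f =
      if l.any (fun x => PySem.Str.isIn x f) then c else b14Scan rest f := by
  induction l with
  | nil => rfl  -- unfolds the empty scan
  | cons hd tl ih =>
    simp only [List.map_cons, List.cons_append, b14Scan, List.any_cons, ih]
    by_cases h : PySem.Str.isIn hd f = true
    · rw [if_pos h, if_pos (by rw [h, Bool.true_or])]
    · simp only [Bool.not_eq_true] at h
      simp only [h, Bool.false_or, Bool.false_eq_true, if_false]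

theorem b14Scan_keywords (f : String) :
    b14Scan b14Keywords f =
      if b14SerifNames.any (fun x => PySem.Str.isIn x f) then 0
      else if b14MonoNames.any (fun x => PySem.Str.isIn x f) then 1
      else 2 := by
  unfold b14Keywords
  rw [b14Scan_map_append,
      ← List.append_nil (b14MonoNames.map (fun n => (n, (1 : Int)))),
      b14Scan_map_append]
  rfl

-- ===== VERDICT (by name: the statement is the Claim_ definition above) =====
theorem map_to_base14_py_spec : Claim_equal_map_to_base14_py := by
  intro f b i fl _
  unfold Spec_map_to_base14_py map_to_base14_py map_to_base14_py_alt
  rw [b14Scan_keywords]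
  simp only [b14SerifNames, b14MonoNames]
  by_cases hS : (["times", "serif", "bookman", "georgia", "palatino", "garamond", "century", "cambria", "didot"] : List String).any (fun x => PySem.Str.isIn x f) = true <;>
  by_cases hM : (["courier", "mono", "consolas", "lucida", "code", "fixed"] : List String).any (fun x => PySem.Str.isIn x f) = true <;>
  by_cases h4 : PySem.Int.band fl 4 ≠ 0 <;>
  by_cases h8 : PySem.Int.band fl 8 ≠ 0 <;>
  cases b <;> cases i <;>
  simp_all <;> decide
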